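-- pv_equiv track=rewrite | github.com/tiendat8438/Python | List/BẦU CỬ.py | find_second_winner
-- ===== SOURCE A (Python) =====
-- from collections import Counter
--
-- def find_second_winner(N, M, votes):
--     vote_counts = Counter(votes)
--
--     # Lấy danh sách số phiếu theo thứ tự giảm dần
--     sorted_votes = sorted(vote_counts.items(), key=lambda x: (-x[1], x[0]))
--
--     if len(sorted_votes) < 2:
--         return "NONE"
--
--     first_count = sorted_votes[0][1]  # Số phiếu cao nhất
--     second_candidates = [x for x in sorted_votes if x[1] < first_count]
--
--     if not second_candidates:
--         return "NONE"
--
--     return second_candidates[0][0]  # Trả về ứng viên có số phiếu nhiều thứ hai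
-- ===== SOURCE B (Python) =====
-- def find_second_winner(N, M, votes):
--     counts = {}
--     for v in votes:
--         counts[v] = counts.get(v, 0) + 1
--     max_count = 0
--     for c in counts.values():
--         if max_count < c:
--             max_count = c
--     best = None
--     for name, c in counts.items():
--         if c < max_count and (best is None or c > best[1] or (c == best[1] and name < best[0])):
--             best = (name, c)
--     return "NONE" if best is None else best[0]
-- ===== Notes on version B (the rewrite author's own statement) =====
-- stated objective: faster
-- what changed: B replaces A's sort of the (candidate,count) pairs by a single linear scan that first finds the maximum count and then keeps the best pair with count below the maximum (higher count first, then lexicographically smaller name).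
import Mathlib
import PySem

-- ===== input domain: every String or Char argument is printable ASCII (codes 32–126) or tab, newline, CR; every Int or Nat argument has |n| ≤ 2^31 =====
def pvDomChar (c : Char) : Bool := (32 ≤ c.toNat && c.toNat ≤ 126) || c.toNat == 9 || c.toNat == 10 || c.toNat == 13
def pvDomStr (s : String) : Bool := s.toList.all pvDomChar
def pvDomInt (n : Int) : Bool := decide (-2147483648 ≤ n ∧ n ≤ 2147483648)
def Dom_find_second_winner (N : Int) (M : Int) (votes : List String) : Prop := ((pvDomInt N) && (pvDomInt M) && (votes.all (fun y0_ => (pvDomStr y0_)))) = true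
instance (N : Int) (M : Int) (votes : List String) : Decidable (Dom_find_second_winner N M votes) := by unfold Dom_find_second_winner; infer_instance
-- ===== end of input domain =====

-- B replaces A's sort of the (candidate,count) pairs by a single linear scan (max count, then
-- best pair strictly below the max); proved to return exactly A's value on every input.


-- ===== PORT A =====
def find_second_winner (N : Int) (M : Int) (votes : List String) : String :=
  let vote_counts := PySem.Dict.counter votes
  let sorted_votes := PySem.List.sorted2 vote_counts.items (fun x => -x.2) (fun x => x.1)
  if sorted_votes.length < 2 then "NONE"
  else
    match sorted_votes with
    | [] => "NONE"   -- unreachable: length ≥ 2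
    | first :: _ =>
      let first_count := first.2
      let second_candidates := sorted_votes.filter (fun x => decide (x.2 < first_count))
      match second_candidates with
      | [] => "NONE"
      | s :: _ => s.1

-- ===== PORT B =====
-- Source B's strict-improvement test: new pair p beats the best-so-far b
def pvBetterB (p : String × Int) (b : Option (String × Int)) : Bool :=
  match b with
  | none => true
  | some q => decide (q.2 < p.2) || (decide (p.2 = q.2) && decide (p.1 < q.1))

def find_second_winner_alt (N : Int) (M : Int) (votes : List String) : String :=
  let counts := votes.foldl (fun d v => d.insert v (d.getD v 0 + 1)) PySem.Dict.empty
  let max_count := counts.values.foldl (fun m c => if m < c then c else m) 0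
  let best := counts.items.foldl
    (fun b p => if decide (p.2 < max_count) && pvBetterB p b then some p else b)
    (none : Option (String × Int))
  match best with
  | none => "NONE"
  | some q => q.1

-- ===== PRECONDITION & SPEC =====
def Spec_find_second_winner (N : Int) (M : Int) (votes : List String) (out : String) : Prop := out = find_second_winner_alt N M votes
instance (N : Int) (M : Int) (votes : List String) (out : String) : Decidable (Spec_find_second_winner N M votes out) := by unfold Spec_find_second_winner; infer_instance

-- ===== CLAIM (what is proved, stated in full; the proofs are below) =====
def Claim_equal_find_second_winner : Prop := ∀ (N : Int) (M : Int) (votes : List String), Dom_find_second_winner N M votes → Spec_find_second_winner N M votes (find_second_winner N M votes)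

-- ===== LEMMAS AND PROOFS =====

-- "p is strictly better than q": more votes, or the same votes and a smaller name
def pvBeats (p q : String × Int) : Prop := q.2 < p.2 ∨ (p.2 = q.2 ∧ p.1 < q.1)

theorem pvBeats_irrefl (p : String × Int) : ¬ pvBeats p p := by
  unfold pvBeats
  rintro (h | ⟨_, h⟩)
  · omega
  · exact lt_irrefl _ h

theorem pvBeats_trans {a b c : String × Int} (h1 : pvBeats a b) (h2 : pvBeats b c) : pvBeats a c := by
  unfold pvBeats at *
  rcases h1 with h1 | ⟨e1, s1⟩ <;> rcases h2 with h2 | ⟨e2, s2⟩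
  · left; omega
  · left; omega
  · left; omega
  · right; exact ⟨by omega, lt_trans s1 s2⟩

theorem pvBeats_not_not_trans {a b c : String × Int}
    (h1 : ¬ pvBeats a b) (h2 : ¬ pvBeats b c) : ¬ pvBeats a c := by
  unfold pvBeats at *
  push_neg at h1 h2
  rintro (h | ⟨e, s⟩)
  · have := h1.1; have := h2.1; omega
  · have hb1 := h1.1; have hb2 := h2.1
    have e1 : a.2 = b.2 := by omega
    have e2 : b.2 = c.2 := by omega
    have s1 := h1.2 e1
    have s2 := h2.2 e2
    exact absurd s (not_lt.mpr (le_trans s2 s1))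

theorem pvBeats_antisymm {p q : String × Int}
    (h1 : ¬ pvBeats p q) (h2 : ¬ pvBeats q p) : p = q := by
  unfold pvBeats at *
  push_neg at h1 h2
  have e : p.2 = q.2 := by have := h1.1; have := h2.1; omega
  have s1 := h1.2 e
  have s2 := h2.2 e.symm
  have : p.1 = q.1 := le_antisymm s2 s1
  exact Prod.ext this e

-- the Bool comparator used by sorted2 with keys (-count, name)
theorem pvCmp_iff (a b : String × Int) :
    ((decide ((fun x : String × Int => -x.2) a < (fun x : String × Int => -x.2) b)) ||
      (!decide ((fun x : String × Int => -x.2) b < (fun x : String × Int => -x.2) a) &&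
        decide ((fun x : String × Int => x.1) a < (fun x : String × Int => x.1) b))) = true ↔
    pvBeats a b := by
  simp only [Bool.or_eq_true, Bool.and_eq_true, Bool.not_eq_true', decide_eq_true_iff,
    decide_eq_false_iff_not, pvBeats]
  constructor
  · rintro (h | ⟨h1, h2⟩)
    · left; omega
    · by_cases hc : b.2 < a.2
      · left; exact hc
      · right; exact ⟨by omega, h2⟩
  · rintro (h | ⟨h1, h2⟩)
    · left; omega
    · right; exact ⟨by omega, h2⟩

-- the unique characterisation both programs compute
def pvIsBest (l : List (String × Int)) (m : Int) (h : String × Int) : Prop :=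
  h ∈ l ∧ h.2 < m ∧ ∀ p ∈ l, p.2 < m → ¬ pvBeats p h

theorem pvIsBest_unique {l : List (String × Int)} {m : Int} {h1 h2 : String × Int}
    (hb1 : pvIsBest l m h1) (hb2 : pvIsBest l m h2) : h1 = h2 :=
  pvBeats_antisymm (hb2.2.2 h1 hb1.1 hb1.2.1) (hb1.2.2 h2 hb2.1 hb2.2.1)

-- insertion sort produces a Pairwise-ordered list (asymmetric + transitive comparator)
theorem pairwise_insertBy (before : (String × Int) → (String × Int) → Bool)
    (asym : ∀ a b, before a b = true → before b a = false)
    (htrans : ∀ a b c, before a b = true → before b c = true → before a c = true)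
    (x : String × Int) (ys : List (String × Int))
    (hys : ys.Pairwise (fun a b => before b a = false)) :
    (PySem.List.insertBy before x ys).Pairwise (fun a b => before b a = false) := by
  induction ys with
  | nil => simp [PySem.List.insertBy]
  | cons y t ih =>
    rw [List.pairwise_cons] at hys
    by_cases hxy : before x y = true
    · have : PySem.List.insertBy before x (y :: t) = x :: y :: t := by
        simp [PySem.List.insertBy, hxy]
      rw [this, List.pairwise_cons]
      refine ⟨?_, List.pairwise_cons.mpr hys⟩
      intro z hz
      rcases List.mem_cons.mp hz with rfl | hzt
      · exact asym _ _ hxy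
      · by_cases hzx : before z x = true
        · have := htrans _ _ _ hzx hxy
          rw [hys.1 z hzt] at this; exact absurd this (by simp)
        · simpa using hzx
    · have : PySem.List.insertBy before x (y :: t) = y :: PySem.List.insertBy before x t := by
        simp [PySem.List.insertBy, hxy]
      rw [this, List.pairwise_cons]
      refine ⟨?_, ih hys.2⟩
      intro z hz
      rcases (PySem.List.mem_insertBy before x z t).mp hz with rfl | hzt
      · simpa using hxy
      · exact hys.1 z hzt

theorem pairwise_foldl_insertBy (before : (String × Int) → (String × Int) → Bool)
    (asym : ∀ a b, before a b = true → before b a = false)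
    (htrans : ∀ a b c, before a b = true → before b c = true → before a c = true)
    (xs acc : List (String × Int))
    (hacc : acc.Pairwise (fun a b => before b a = false)) :
    (xs.foldl (fun acc x => PySem.List.insertBy before x acc) acc).Pairwise
      (fun a b => before b a = false) := by
  induction xs generalizing acc with
  | nil => exact hacc
  | cons x t ih => exact ih _ (pairwise_insertBy before asym htrans x acc hacc)

theorem pvSorted_pairwise (l : List (String × Int)) :
    (PySem.List.sorted2 l (fun x => -x.2) (fun x => x.1)).Pairwise
      (fun a b => ¬ pvBeats b a) := by
  have h := pairwise_foldl_insertBy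
    (fun a b => (decide ((-a.2 : Int) < -b.2) || (!decide ((-b.2 : Int) < -a.2) && decide (a.1 < b.1))))
    (by
      intro a b hab
      rw [pvCmp_iff] at hab
      rw [Bool.eq_false_iff, Ne, pvCmp_iff]
      exact fun h => pvBeats_irrefl b (pvBeats_trans h hab))
    (by
      intro a b c hab hbc
      rw [pvCmp_iff] at *
      exact pvBeats_trans hab hbc)
    l [] (by simp)
  have e : PySem.List.sorted2 l (fun x : String × Int => -x.2) (fun x => x.1) =
      l.foldl (fun acc x => PySem.List.insertBy
        (fun a b => (decide ((-a.2 : Int) < -b.2) || (!decide ((-b.2 : Int) < -a.2) && decide (a.1 < b.1)))) x acc) [] := by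
    rfl
  rw [e]
  refine (h.imp ?_)
  intro a b hba
  rw [Bool.eq_false_iff, Ne, pvCmp_iff] at hba
  exact hba

-- the head of A's filtered sorted list is the best element
theorem pvHead_filter_best {s l : List (String × Int)} {m : Int} {h : String × Int}
    {t : List (String × Int)}
    (hperm : s.Perm l) (hpw : s.Pairwise (fun a b => ¬ pvBeats b a))
    (hf : s.filter (fun x => decide (x.2 < m)) = h :: t) :
    pvIsBest l m h := by
  have hmemf : h ∈ s.filter (fun x => decide (x.2 < m)) := by rw [hf]; exact List.mem_cons_self
  have hms : h ∈ s := (List.mem_filter.mp hmemf).1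
  have hlt : h.2 < m := by simpa using (List.mem_filter.mp hmemf).2
  refine ⟨hperm.mem_iff.mp hms, hlt, ?_⟩
  intro p hp hpm
  have hpf : p ∈ s.filter (fun x => decide (x.2 < m)) :=
    List.mem_filter.mpr ⟨hperm.mem_iff.mpr hp, by simpa using hpm⟩
  rw [hf] at hpf
  rcases List.mem_cons.mp hpf with rfl | hpt
  · exact pvBeats_irrefl p
  · have hpwf : (s.filter (fun x => decide (x.2 < m))).Pairwise (fun a b => ¬ pvBeats b a) :=
      hpw.filter _
    rw [hf, List.pairwise_cons] at hpwf
    exact hpwf.1 p hpt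

-- A's filter is empty iff nothing is strictly below m
theorem pvFilter_empty_iff {s l : List (String × Int)} {m : Int} (hperm : s.Perm l) :
    s.filter (fun x => decide (x.2 < m)) = [] ↔ ∀ p ∈ l, ¬ p.2 < m := by
  rw [List.filter_eq_nil_iff]
  constructor
  · intro hh p hp; have := hh p (hperm.mem_iff.mpr hp); simpa using this
  · intro hh p hp; have := hh p (hperm.mem_iff.mp hp); simpa using this

-- B's running-max loop
theorem pvFoldlMax_spec (vals : List Int) (init : Int) :
    init ≤ vals.foldl (fun m c => if m < c then c else m) init ∧
    (∀ v ∈ vals, v ≤ vals.foldl (fun m c => if m < c then c else m) init) ∧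
    (vals.foldl (fun m c => if m < c then c else m) init = init ∨
      vals.foldl (fun m c => if m < c then c else m) init ∈ vals) := by
  induction vals generalizing init with
  | nil => simp
  | cons x t ih =>
    simp only [List.foldl_cons]
    by_cases hc : init < x
    · rw [if_pos hc]
      rcases ih x with ⟨h1, h2, h3⟩
      refine ⟨by omega, ?_, ?_⟩
      · intro v hv
        rcases List.mem_cons.mp hv with rfl | hvt
        · exact h1
        · exact h2 v hvt
      · rcases h3 with h3 | h3
        · right; rw [h3]; exact List.mem_cons_self
        · right; exact List.mem_cons_of_mem _ h3
    · rw [if_neg hc]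
      rcases ih init with ⟨h1, h2, h3⟩
      refine ⟨h1, ?_, ?_⟩
      · intro v hv
        rcases List.mem_cons.mp hv with rfl | hvt
        · omega
        · exact h2 v hvt
      · rcases h3 with h3 | h3
        · left; exact h3
        · right; exact List.mem_cons_of_mem _ h3

-- B's best-so-far loop, empty result
theorem pvFoldBest_none_iff (m : Int) (l : List (String × Int)) (b : Option (String × Int)) :
    l.foldl (fun b p => if decide (p.2 < m) && pvBetterB p b then some p else b) b = none ↔
    (b = none ∧ ∀ p ∈ l, ¬ p.2 < m) := by
  induction l generalizing b with
  | nil => simp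
  | cons x t ih =>
    simp only [List.foldl_cons]
    rw [ih]
    constructor
    · rintro ⟨hstep, ht⟩
      by_cases hc : (decide (x.2 < m) && pvBetterB x b) = true
      · rw [if_pos hc] at hstep; exact absurd hstep (by simp)
      · rw [if_neg hc] at hstep
        subst hstep
        simp only [pvBetterB, Bool.and_true, decide_eq_true_eq] at hc
        refine ⟨rfl, ?_⟩
        intro p hp
        rcases List.mem_cons.mp hp with rfl | hpt
        · simpa using hc
        · exact ht p hpt
    · rintro ⟨rfl, hall⟩
      have hx : ¬ x.2 < m := hall x List.mem_cons_self
      have : (decide (x.2 < m) && pvBetterB x none) = false := by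
        simp [hx]
      rw [this]
      exact ⟨by simp, fun p hp => hall p (List.mem_cons_of_mem _ hp)⟩

theorem pvBetterB_some_iff (p q : String × Int) :
    pvBetterB p (some q) = true ↔ pvBeats p q := by
  simp only [pvBetterB, Bool.or_eq_true, Bool.and_eq_true, decide_eq_true_eq, pvBeats]

-- B's best-so-far loop, non-empty result: the result dominates everything below m
theorem pvFoldBest_some (m : Int) (l : List (String × Int)) (b : Option (String × Int))
    (hgood : ∀ q, b = some q → q.2 < m) (h : String × Int)
    (hres : l.foldl (fun b p => if decide (p.2 < m) && pvBetterB p b then some p else b) b = some h) :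
    (b = some h ∨ h ∈ l) ∧ h.2 < m ∧
      (∀ p ∈ l, p.2 < m → ¬ pvBeats p h) ∧ (∀ q, b = some q → ¬ pvBeats q h) := by
  induction l generalizing b with
  | nil =>
    simp only [List.foldl_nil] at hres
    refine ⟨Or.inl hres, hgood h hres, by simp, ?_⟩
    intro q hq
    rw [hres] at hq
    cases hq
    exact pvBeats_irrefl h
  | cons x t ih =>
    simp only [List.foldl_cons] at hres
    by_cases hc : (decide (x.2 < m) && pvBetterB x b) = true
    · rw [if_pos hc] at hres
      have hxm : x.2 < m := by
        have := hc; simp only [Bool.and_eq_true, decide_eq_true_eq] at this; exact this.1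
      have hgood' : ∀ q, some x = some q → q.2 < m := by
        rintro q hq; cases hq; exact hxm
      rcases ih (some x) hgood' hres with ⟨hmem, hhm, htail, hacc⟩
      have hxh : ¬ pvBeats x h := hacc x rfl
      refine ⟨?_, hhm, ?_, ?_⟩
      · rcases hmem with hbx | hht
        · right; cases hbx; exact List.mem_cons_self
        · right; exact List.mem_cons_of_mem _ hht
      · intro p hp hpm
        rcases List.mem_cons.mp hp with rfl | hpt
        · exact hxh
        · exact htail p hpt hpm
      · intro q hq
        subst hq
        have hbeats : pvBeats x q := by
          simp only [Bool.and_eq_true, decide_eq_true_eq] at hc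
          exact (pvBetterB_some_iff x q).mp hc.2
        exact fun hqh => hxh (pvBeats_trans hbeats hqh)
    · rw [if_neg hc] at hres
      rcases ih b hgood hres with ⟨hmem, hhm, htail, hacc⟩
      refine ⟨?_, hhm, ?_, hacc⟩
      · rcases hmem with hb | hht
        · left; exact hb
        · right; exact List.mem_cons_of_mem _ hht
      · intro p hp hpm
        rcases List.mem_cons.mp hp with rfl | hpt
        · -- p = x was skipped: the accumulator was at least as good
          simp only [Bool.and_eq_true, decide_eq_true_eq, not_and] at hc
          have hnb : ¬ pvBetterB p b = true := hc hpm
          cases hb : b with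
          | none => rw [hb] at hnb; simp [pvBetterB] at hnb
          | some q =>
            rw [hb] at hnb
            rw [pvBetterB_some_iff] at hnb
            exact pvBeats_not_not_trans hnb (hacc q hb)
        · exact htail p hpt hpm

theorem pvCounts_pos (votes : List String) :
    ∀ p ∈ (PySem.Dict.counter votes).items, 1 ≤ p.2 := by
  intro p hp
  rw [PySem.Dict.items_counter] at hp
  rcases List.mem_map.mp hp with ⟨k, hk, rfl⟩
  have hkv : k ∈ votes := (PySem.Set.mem_ofList votes k).mp hk
  have h1 : 0 < votes.count k := List.count_pos_iff.mpr hkv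
  have h2 : (1 : Int) ≤ (votes.count k : Int) := by exact_mod_cast h1
  simpa using h2

-- the generalized statement: both selection mechanisms agree on any list of positive counts
theorem pvMain (l : List (String × Int)) (hpos : ∀ p ∈ l, 1 ≤ p.2) :
    (if (PySem.List.sorted2 l (fun x => -x.2) (fun x => x.1)).length < 2 then "NONE"
     else
       match PySem.List.sorted2 l (fun x => -x.2) (fun x => x.1) with
       | [] => "NONE"
       | first :: _ =>
         match (PySem.List.sorted2 l (fun x => -x.2) (fun x => x.1)).filter
             (fun x => decide (x.2 < first.2)) with
         | [] => "NONE"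
         | s :: _ => s.1) =
    (match l.foldl (fun b p =>
        if decide (p.2 < (l.map (fun x => x.2)).foldl (fun m c => if m < c then c else m) 0) &&
            pvBetterB p b then some p else b) none with
     | none => "NONE"
     | some q => q.1) := by
  obtain ⟨hmc0, hmcub, hmcmem⟩ := pvFoldlMax_spec (l.map (fun x => x.2)) 0
  have hperm := PySem.List.sorted2_perm l (fun x : String × Int => -x.2) (fun x => x.1) false
  have hpw := pvSorted_pairwise l
  rcases hs : PySem.List.sorted2 l (fun x : String × Int => -x.2) (fun x => x.1) with _ | ⟨first, rest⟩
  · -- empty: l = []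
    rw [hs] at hperm
    have hl0 : l = [] := hperm.nil_eq.symm
    subst hl0
    simp
  · rw [hs] at hperm hpw
    by_cases hlen : (first :: rest).length < 2
    · -- exactly one candidate: both sides "NONE"
      rw [if_pos hlen]
      have hrest : rest = [] := by
        simp only [List.length_cons] at hlen
        exact List.length_eq_zero_iff.mp (by omega)
      subst hrest
      have hl1 : l = [first] := (List.perm_singleton.mp hperm.symm)
      have hfirst1 : 1 ≤ first.2 := hpos first (by rw [hl1]; exact List.mem_cons_self)
      rw [hl1]
      simp only [List.map_cons, List.map_nil, List.foldl_cons, List.foldl_nil]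
      have hm : (if (0 : Int) < first.2 then first.2 else 0) = first.2 := if_pos (by omega)
      simp only [hm]
      have : (decide (first.2 < first.2) && pvBetterB first none) = false := by simp
      rw [this]
      simp
    · rw [if_neg hlen]
      show (match (first :: rest).filter (fun x => decide (x.2 < first.2)) with
            | [] => "NONE"
            | s :: _ => s.1) = _
      -- first.2 equals B's max count
      have hfl : first ∈ l := hperm.mem_iff.mp List.mem_cons_self
      have hub : ∀ p ∈ l, p.2 ≤ first.2 := by
        intro p hp
        have hps : p ∈ first :: rest := hperm.mem_iff.mpr hp
        rcases List.mem_cons.mp hps with rfl | hpt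
        · exact le_refl _
        · rw [List.pairwise_cons] at hpw
          have hnb := hpw.1 p hpt
          unfold pvBeats at hnb
          push_neg at hnb
          exact hnb.1
      have hmceq : (l.map (fun x => x.2)).foldl (fun m c => if m < c then c else m) 0 = first.2 := by
        have h1 : first.2 ≤ (l.map (fun x => x.2)).foldl (fun m c => if m < c then c else m) 0 :=
          hmcub _ (List.mem_map.mpr ⟨first, hfl, rfl⟩)
        have h2 : (l.map (fun x => x.2)).foldl (fun m c => if m < c then c else m) 0 ≤ first.2 := by
          rcases hmcmem with h0 | hmem
          · have := hpos first hfl; omega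
          · rcases List.mem_map.mp hmem with ⟨p, hp, hpe⟩
            rw [← hpe]
            exact hub p hp
        omega
      rw [hmceq]
      -- compare the two selection mechanisms
      rcases hf : (first :: rest).filter (fun x => decide (x.2 < first.2)) with _ | ⟨h, t⟩
      · have hnone : l.foldl (fun b p =>
            if decide (p.2 < first.2) && pvBetterB p b then some p else b) none = none := by
          rw [pvFoldBest_none_iff]
          exact ⟨rfl, (pvFilter_empty_iff hperm).mp hf⟩
        rw [hnone, hf]
      · have hbest : pvIsBest l first.2 h := pvHead_filter_best hperm hpw hf
        rcases hg : l.foldl (fun b p =>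
            if decide (p.2 < first.2) && pvBetterB p b then some p else b) none with _ | h'
        · rw [pvFoldBest_none_iff] at hg
          exact absurd hbest.2.1 (hg.2 h hbest.1)
        · rcases pvFoldBest_some first.2 l none (by simp) h' hg with ⟨hmem, hm, hall, _⟩
          have hbest' : pvIsBest l first.2 h' := by
            refine ⟨?_, hm, hall⟩
            rcases hmem with hh | hh
            · cases hh
            · exact hh
          rw [hf]
          rw [pvIsBest_unique hbest hbest', hg]

-- ===== VERDICT (by name: the statement is the Claim_ definition above) =====
theorem find_second_winner_spec : Claim_equal_find_second_winner := by
  intro N M votes _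
  unfold Spec_find_second_winner find_second_winner find_second_winner_alt
  exact pvMain (PySem.Dict.counter votes).items (pvCounts_pos votes)
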